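-- pv_equiv track=rewrite | github.com/AndrewDongminYoo/CREMA-CODING-TEST | Q5.Bitwise_Equation.py | bitwise_equations
-- ===== SOURCE A (Python) =====
-- def bitwise_equations(array1, array2):
--
--     def get_bit_result(expected_add_result, expected_bit_xor_result):
--         # expected_bit_xor_result = 2, expected_add_result = 4
--         # A = 1
--         A = (expected_add_result - expected_bit_xor_result) // 2
--         x = 0
--         y = 0
--         for n in range(40):  # n = 0 ? Xi = 0, Ai = 1
--             Xi = (expected_bit_xor_result & (1 << n))
--             Ai = (A & (1 << n))
--             if x + y == expected_add_result and x ^ y == expected_bit_xor_result: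
--                 break
--             if Xi == 0 and Ai == 0:
--                 pass
--             elif Xi == 0 and Ai > 0:
--                 x = ((1 << n) | x)  # 1
--                 y = ((1 << n) | y)  # 1
--
--             elif Xi > 0 and Ai == 0:
--                 y = ((1 << n) | y)
--             else:
--                 return 0
--
--         return 2 * x + 3 * y  # 11
--
--     answer = []
--
--     for i in range(len(array1)):
--         answer.append(get_bit_result(array1[i], array2[i]))
--
--     return answer
-- ===== SOURCE B (Python) =====
-- def bitwise_equations(array1, array2):
--     # Closed form: A = (S-X)//2 is the carry/AND part, X the XOR part.
--     # A bit set in both A and X is contradictory -> 0; otherwise x = A, y = A|X,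
--     # everything truncated to the 40 bits the original loop inspects.
--     MASK = (1 << 40) - 1
--     answer = []
--     for i in range(len(array1)):
--         S, X = array1[i], array2[i]
--         A = (S - X) // 2
--         if A & X & MASK:
--             answer.append(0)
--         else:
--             answer.append(2 * (A & MASK) + 3 * ((A | X) & MASK))
--     return answer
-- ===== Notes on version B (the rewrite author's own statement) =====
-- stated objective: simpler
-- what changed: The 40-iteration bit-building loop with early break is replaced by a closed form per pair: A=(S-X)>>1, return 0 if A&X&MASK else 2*(A&MASK)+3*((A|X)&MASK) with MASK=(1<<40)-1.
import Mathlib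
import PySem

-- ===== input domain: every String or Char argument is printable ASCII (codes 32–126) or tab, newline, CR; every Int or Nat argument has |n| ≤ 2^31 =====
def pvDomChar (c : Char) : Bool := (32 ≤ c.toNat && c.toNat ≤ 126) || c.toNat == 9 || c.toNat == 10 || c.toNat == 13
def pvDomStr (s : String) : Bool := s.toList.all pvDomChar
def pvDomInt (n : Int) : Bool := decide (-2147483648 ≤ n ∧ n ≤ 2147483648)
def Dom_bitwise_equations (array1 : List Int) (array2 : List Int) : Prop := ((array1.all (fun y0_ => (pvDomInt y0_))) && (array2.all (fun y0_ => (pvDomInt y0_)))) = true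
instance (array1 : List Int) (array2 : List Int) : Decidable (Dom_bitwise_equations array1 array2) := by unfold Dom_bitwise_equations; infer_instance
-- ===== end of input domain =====

-- B replaces A's per-pair 40-iteration bit-building loop by a closed form;
-- equivalence is about the RETURN value (neither program mutates its arguments).

-- ===== PORT A =====
-- inner loop of get_bit_result: n is the loop counter, (x, y) the accumulated bits
def pvGo (S X A : Int) (n : Nat) (x y : Int) : Int :=
  if n < 40 then
    let Xi := PySem.Int.band X ((1 : Int) <<< n)
    let Ai := PySem.Int.band A ((1 : Int) <<< n)
    if x + y = S ∧ PySem.Int.bxor x y = X then 2 * x + 3 * y   -- break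
    else if Xi = 0 ∧ Ai = 0 then pvGo S X A (n + 1) x y
    else if Xi = 0 ∧ Ai > 0 then
      pvGo S X A (n + 1) (PySem.Int.bor ((1 : Int) <<< n) x) (PySem.Int.bor ((1 : Int) <<< n) y)
    else if Xi > 0 ∧ Ai = 0 then pvGo S X A (n + 1) x (PySem.Int.bor ((1 : Int) <<< n) y)
    else 0                                                      -- return 0
  else 2 * x + 3 * y
  termination_by 40 - n

-- get_bit_result(expected_add_result, expected_bit_xor_result)
def pvGetBitResult (S X : Int) : Int :=
  let A := PySem.Int.floordiv (S - X) 2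
  pvGo S X A 0 0 0

def bitwise_equations (array1 : List Int) (array2 : List Int) : List Int :=
  (PySem.List.pyRange 0 (array1.length : Int) 1).foldl
    (fun answer i =>
      answer ++ [pvGetBitResult (PySem.List.pyGetD array1 i 0) (PySem.List.pyGetD array2 i 0)]) []

-- ===== PORT B =====
-- closed form: A = (S-X)//2; invalid iff A and X share a bit in the 40-bit window
def pvClosedForm (S X : Int) : Int :=
  let MASK : Int := (1 : Int) <<< (40 : Nat) - 1
  let A : Int := PySem.Int.floordiv (S - X) 2
  if PySem.Int.band (PySem.Int.band A X) MASK ≠ 0 then 0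
  else 2 * PySem.Int.band A MASK + 3 * PySem.Int.band (PySem.Int.bor A X) MASK

def bitwise_equations_alt (array1 : List Int) (array2 : List Int) : List Int :=
  (List.range array1.length).map
    (fun (i : Nat) => pvClosedForm (PySem.List.pyGetD array1 (i : Int) 0) (PySem.List.pyGetD array2 (i : Int) 0))

-- ===== PRECONDITION & SPEC =====
-- Pre_ excludes exactly the inputs where array2 is shorter than array1: there
-- Python A (and Python B alike) raises IndexError on array2[i].
def Pre_bitwise_equations (array1 : List Int) (array2 : List Int) : Prop :=
  array1.length ≤ array2.length
instance (array1 : List Int) (array2 : List Int) : Decidable (Pre_bitwise_equations array1 array2) := by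
  unfold Pre_bitwise_equations; infer_instance

def pvWitness_bitwise_equations : List Int × List Int := ([4, 10, 7], [2, 4, 3])

def Spec_bitwise_equations (array1 : List Int) (array2 : List Int) (out : List Int) : Prop :=
  out = bitwise_equations_alt array1 array2
instance (array1 : List Int) (array2 : List Int) (out : List Int) : Decidable (Spec_bitwise_equations array1 array2 out) := by
  unfold Spec_bitwise_equations; infer_instance

-- ===== CLAIM (what is proved, stated in full; the proofs are below) =====
def Claim_equal_bitwise_equations : Prop :=
  ∀ (array1 : List Int) (array2 : List Int), Dom_bitwise_equations array1 array2 →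
    Pre_bitwise_equations array1 array2 →
    Spec_bitwise_equations array1 array2 (bitwise_equations array1 array2)

-- ===== LEMMAS AND PROOFS =====

-- ---- generic Nat facts ----
theorem pvNatAndAddLdiff (a b : Nat) : (a &&& b) + Nat.ldiff a b = a := by
  induction a using Nat.strong_induction_on generalizing b with
  | _ a ih =>
    match a with
    | 0 =>
      have h2 : Nat.ldiff 0 b = 0 := Nat.eq_of_testBit_eq (by simp [Nat.testBit_ldiff])
      simp [h2]
    | (a + 1) =>
      have IH := ih ((a + 1) / 2) (by omega) (b / 2)
      have e1 : ((a + 1) &&& b) / 2 = (a + 1) / 2 &&& b / 2 :=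
        Nat.eq_of_testBit_eq (by simp [Nat.testBit_div_two, Nat.testBit_and])
      have e2 : (Nat.ldiff (a + 1) b) / 2 = Nat.ldiff ((a + 1) / 2) (b / 2) :=
        Nat.eq_of_testBit_eq (by simp [Nat.testBit_div_two, Nat.testBit_ldiff])
      have t1 := Nat.testBit_and (a + 1) b 0
      have t2 := Nat.testBit_ldiff (a + 1) b 0
      simp only [Nat.testBit_zero, ← decide_not, ← Bool.decide_and, decide_eq_decide] at t1 t2
      omega

theorem pvNatAndAddOr (a b : Nat) : (a &&& b) + (a ||| b) = a + b := by
  induction a using Nat.strong_induction_on generalizing b with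
  | _ a ih =>
    match a with
    | 0 => simp
    | (a + 1) =>
      have IH := ih ((a + 1) / 2) (by omega) (b / 2)
      have e1 : ((a + 1) &&& b) / 2 = (a + 1) / 2 &&& b / 2 :=
        Nat.eq_of_testBit_eq (by simp [Nat.testBit_div_two, Nat.testBit_and])
      have e2 : ((a + 1) ||| b) / 2 = (a + 1) / 2 ||| b / 2 :=
        Nat.eq_of_testBit_eq (by simp [Nat.testBit_div_two, Nat.testBit_or])
      have t1 := Nat.testBit_and (a + 1) b 0
      have t2 := Nat.testBit_or (a + 1) b 0
      simp only [Nat.testBit_zero, ← Bool.decide_and, ← Bool.decide_or, decide_eq_decide] at t1 t2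
      omega

theorem pvNatSubAnd (a b : Nat) : a - (a &&& b) = Nat.ldiff a b := by
  have := pvNatAndAddLdiff a b; omega

-- ---- Int.testBit toolkit ----
theorem pvTbCoe (n i : Nat) : ((n : Int)).testBit i = n.testBit i := rfl
theorem pvTbNegSucc (n i : Nat) : (Int.negSucc n).testBit i = !n.testBit i := rfl
theorem pvTbZero (i : Nat) : (0 : Int).testBit i = false := by
  simpa using pvTbCoe 0 i

theorem pvIntExt {a b : Int} (h : ∀ i, a.testBit i = b.testBit i) : a = b := by
  cases a with
  | ofNat m =>
    cases b with
    | ofNat n =>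
      have : m = n := Nat.eq_of_testBit_eq (fun i => h i)
      simp [this]
    | negSucc n =>
      exfalso
      have hi := h (m + n)
      have h1 : m.testBit (m + n) = false :=
        Nat.testBit_eq_false_of_lt (lt_of_lt_of_le (Nat.lt_two_pow_self)
          (Nat.pow_le_pow_right (by omega) (by omega)))
      have h2 : n.testBit (m + n) = false :=
        Nat.testBit_eq_false_of_lt (lt_of_lt_of_le (Nat.lt_two_pow_self)
          (Nat.pow_le_pow_right (by omega) (by omega)))
      simp only [Int.testBit] at hi
      rw [h1, h2] at hi
      simp at hi
  | negSucc m =>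
    cases b with
    | ofNat n =>
      exfalso
      have hi := h (m + n)
      have h1 : m.testBit (m + n) = false :=
        Nat.testBit_eq_false_of_lt (lt_of_lt_of_le (Nat.lt_two_pow_self)
          (Nat.pow_le_pow_right (by omega) (by omega)))
      have h2 : n.testBit (m + n) = false :=
        Nat.testBit_eq_false_of_lt (lt_of_lt_of_le (Nat.lt_two_pow_self)
          (Nat.pow_le_pow_right (by omega) (by omega)))
      simp only [Int.testBit] at hi
      rw [h1, h2] at hi
      simp at hi
    | negSucc n =>
      have : m = n := Nat.eq_of_testBit_eq (fun i => by
        have := h i; rw [pvTbNegSucc, pvTbNegSucc] at this; simpa using this)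
      simp [this]

theorem pvNegCoeSub (n : Nat) : -(n : Int) - 1 = Int.negSucc n := by
  simp [Int.negSucc_eq]; ring
theorem pvNegNegSuccSub (n : Nat) : -(Int.negSucc n) - 1 = (n : Int) := by
  simp [Int.negSucc_eq]

theorem pvTbBand (a b : Int) (i : Nat) :
    (PySem.Int.band a b).testBit i = (a.testBit i && b.testBit i) := by
  cases a with
  | ofNat m =>
    cases b with
    | ofNat n =>
      simp only [PySem.Int.band, Int.ofNat_eq_natCast]
      rw [if_pos (by positivity), if_pos (by positivity)]
      simp [pvTbCoe, Nat.testBit_and]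
    | negSucc n =>
      simp only [PySem.Int.band, Int.ofNat_eq_natCast]
      rw [if_pos (by positivity), if_neg (by simp [Int.negSucc_eq]; omega)]
      rw [pvNegNegSuccSub]
      simp only [Int.toNat_natCast]
      rw [pvNatSubAnd]
      simp [pvTbCoe, pvTbNegSucc, Nat.testBit_ldiff]
  | negSucc m =>
    cases b with
    | ofNat n =>
      simp only [PySem.Int.band, Int.ofNat_eq_natCast]
      rw [if_neg (by simp [Int.negSucc_eq]; omega), if_pos (by positivity)]
      rw [pvNegNegSuccSub]
      simp only [Int.toNat_natCast]
      rw [pvNatSubAnd]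
      simp [pvTbCoe, pvTbNegSucc, Nat.testBit_ldiff, Bool.and_comm]
    | negSucc n =>
      simp only [PySem.Int.band]
      rw [if_neg (by simp [Int.negSucc_eq]; omega), if_neg (by simp [Int.negSucc_eq]; omega)]
      rw [pvNegNegSuccSub, pvNegNegSuccSub]
      simp only [Int.toNat_natCast]
      rw [pvNegCoeSub]
      simp [pvTbNegSucc, Nat.testBit_or]

theorem pvTbBor (a b : Int) (i : Nat) :
    (PySem.Int.bor a b).testBit i = (a.testBit i || b.testBit i) := by
  cases a with
  | ofNat m =>
    cases b with
    | ofNat n =>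
      simp only [PySem.Int.bor, Int.ofNat_eq_natCast]
      rw [if_pos (by positivity), if_pos (by positivity)]
      simp [pvTbCoe, Nat.testBit_or]
    | negSucc n =>
      simp only [PySem.Int.bor, Int.ofNat_eq_natCast]
      rw [if_pos (by positivity), if_neg (by simp [Int.negSucc_eq]; omega)]
      rw [pvNegNegSuccSub]
      simp only [Int.toNat_natCast]
      rw [pvNatSubAnd, pvNegCoeSub]
      simp only [pvTbCoe, pvTbNegSucc, Nat.testBit_ldiff]
      cases m.testBit i <;> cases n.testBit i <;> rfl
  | negSucc m =>
    cases b with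
    | ofNat n =>
      simp only [PySem.Int.bor, Int.ofNat_eq_natCast]
      rw [if_neg (by simp [Int.negSucc_eq]; omega), if_pos (by positivity)]
      rw [pvNegNegSuccSub]
      simp only [Int.toNat_natCast]
      rw [pvNatSubAnd, pvNegCoeSub]
      simp only [pvTbCoe, pvTbNegSucc, Nat.testBit_ldiff]
      cases m.testBit i <;> cases n.testBit i <;> rfl
    | negSucc n =>
      simp only [PySem.Int.bor]
      rw [if_neg (by simp [Int.negSucc_eq]; omega), if_neg (by simp [Int.negSucc_eq]; omega)]
      rw [pvNegNegSuccSub, pvNegNegSuccSub]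
      simp only [Int.toNat_natCast]
      rw [pvNegCoeSub]
      simp [pvTbNegSucc, Nat.testBit_and]

theorem pvTbBxor (a b : Int) (i : Nat) :
    (PySem.Int.bxor a b).testBit i = (a.testBit i ^^ b.testBit i) := by
  cases a with
  | ofNat m =>
    cases b with
    | ofNat n =>
      simp only [PySem.Int.bxor, Int.ofNat_eq_natCast]
      rw [if_pos (by positivity), if_pos (by positivity)]
      simp [pvTbCoe, Nat.testBit_xor]
    | negSucc n =>
      simp only [PySem.Int.bxor, Int.ofNat_eq_natCast]
      rw [if_pos (by positivity), if_neg (by simp [Int.negSucc_eq]; omega)]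
      rw [pvNegNegSuccSub]
      simp only [Int.toNat_natCast]
      rw [pvNegCoeSub]
      simp only [pvTbCoe, pvTbNegSucc, Nat.testBit_xor]
      cases m.testBit i <;> cases n.testBit i <;> rfl
  | negSucc m =>
    cases b with
    | ofNat n =>
      simp only [PySem.Int.bxor, Int.ofNat_eq_natCast]
      rw [if_neg (by simp [Int.negSucc_eq]; omega), if_pos (by positivity)]
      rw [pvNegNegSuccSub]
      simp only [Int.toNat_natCast]
      rw [pvNegCoeSub]
      simp only [pvTbCoe, pvTbNegSucc, Nat.testBit_xor]
      cases m.testBit i <;> cases n.testBit i <;> rfl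
    | negSucc n =>
      simp only [PySem.Int.bxor]
      rw [if_neg (by simp [Int.negSucc_eq]; omega), if_neg (by simp [Int.negSucc_eq]; omega)]
      rw [pvNegNegSuccSub, pvNegNegSuccSub]
      simp only [Int.toNat_natCast, pvTbCoe, pvTbNegSucc, Nat.testBit_xor]
      cases m.testBit i <;> cases n.testBit i <;> rfl

theorem pvOneShl (k : Nat) : ((1 : Int) <<< k) = 2 ^ k := by
  rw [Int.shiftLeft_eq]; ring

theorem pvTbPow (k i : Nat) : ((2 : Int) ^ k).testBit i = decide (k = i) := by
  have : ((2 : Int) ^ k) = ((2 ^ k : Nat) : Int) := by push_cast; ring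
  rw [this, pvTbCoe, Nat.testBit_two_pow]

theorem pvTbMask (k i : Nat) : ((2 : Int) ^ k - 1).testBit i = decide (i < k) := by
  have : ((2 : Int) ^ k - 1) = ((2 ^ k - 1 : Nat) : Int) := by
    have : (1 : Nat) ≤ 2 ^ k := Nat.one_le_two_pow
    push_cast [this]; ring
  rw [this, pvTbCoe, Nat.testBit_two_pow_sub_one]

-- an Int whose set bits all lie below k is a Nat
theorem pvNonnegOfBits {c : Int} {k : Nat} (h : ∀ i, c.testBit i = true → i < k) : 0 ≤ c := by
  cases c with
  | ofNat m => exact Int.natCast_nonneg m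
  | negSucc m =>
    exfalso
    have h1 : m.testBit (m + k) = false :=
      Nat.testBit_eq_false_of_lt (lt_of_lt_of_le (Nat.lt_two_pow_self)
        (Nat.pow_le_pow_right (by omega) (by omega)))
    have := h (m + k) (by rw [pvTbNegSucc, h1]; rfl)
    omega

theorem pvBorEqAdd {a b : Int} (ha : 0 ≤ a) (hb : 0 ≤ b)
    (h : PySem.Int.band a b = 0) : PySem.Int.bor a b = a + b := by
  rw [PySem.Int.band_of_nonneg ha hb] at h
  have hand : a.toNat &&& b.toNat = 0 := by exact_mod_cast h
  rw [PySem.Int.bor_of_nonneg ha hb]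
  have := pvNatAndAddOr a.toNat b.toNat
  rw [hand] at this
  omega

theorem pvFloordivTwoMul (x : Int) : PySem.Int.floordiv (2 * x) 2 = x := by
  show Int.fdiv (2 * x) 2 = x
  rw [Int.mul_fdiv_cancel_left _ (by norm_num)]

-- band with a power of two isolates a bit
theorem pvBandPow (a : Int) (k : Nat) :
    PySem.Int.band a ((1 : Int) <<< k) = if a.testBit k then (2 : Int) ^ k else 0 := by
  apply pvIntExt; intro i
  rw [pvTbBand, pvOneShl, pvTbPow]
  by_cases hik : k = i
  · subst hik
    cases h : a.testBit k <;> simp [pvTbZero, pvTbPow]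
  · cases h : a.testBit k <;> simp [hik, pvTbZero, pvTbPow]

-- masking one more bit that is absent changes nothing
theorem pvMaskStep {a : Int} {k : Nat} (h : a.testBit k = false) :
    PySem.Int.band a ((2 : Int) ^ (k + 1) - 1) = PySem.Int.band a ((2 : Int) ^ k - 1) := by
  apply pvIntExt; intro i
  rw [pvTbBand, pvTbBand, pvTbMask, pvTbMask]
  by_cases hik : i = k
  · subst hik; simp [h]
  · by_cases hlt : i < k
    · simp [hlt, (by omega : i < k + 1)]
    · rw [decide_eq_false hlt, decide_eq_false (show ¬ i < k + 1 by omega)]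

-- or-ing in bit k that is present extends the mask
theorem pvBorStep {a : Int} {k : Nat} (h : a.testBit k = true) :
    PySem.Int.bor ((1 : Int) <<< k) (PySem.Int.band a ((2 : Int) ^ k - 1)) =
      PySem.Int.band a ((2 : Int) ^ (k + 1) - 1) := by
  apply pvIntExt; intro i
  rw [pvTbBor, pvTbBand, pvTbBand, pvOneShl, pvTbPow, pvTbMask, pvTbMask]
  by_cases hik : i = k
  · subst hik; simp [h, (by omega : i < i + 1)]
  · by_cases hlt : i < k
    · simp [Ne.symm hik, hlt, (by omega : i < k + 1)]
    · rw [decide_eq_false (fun hk' => hik hk'.symm), decide_eq_false hlt,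
          decide_eq_false (show ¬ i < k + 1 by omega)]
      simp

-- the break branch: if x+y = S and x^y = X hold for the partial bits, the
-- partial value already is the closed form
theorem pvBreak (S X : Int) (k : Nat) (hk : k ≤ 40)
    (H1 : ∀ j, j < k → ((PySem.Int.floordiv (S - X) 2).testBit j && X.testBit j) = false)
    (hsum : PySem.Int.band (PySem.Int.floordiv (S - X) 2) ((2 : Int) ^ k - 1) +
            PySem.Int.band (PySem.Int.bor (PySem.Int.floordiv (S - X) 2) X) ((2 : Int) ^ k - 1) = S)
    (hxor : PySem.Int.bxor (PySem.Int.band (PySem.Int.floordiv (S - X) 2) ((2 : Int) ^ k - 1))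
            (PySem.Int.band (PySem.Int.bor (PySem.Int.floordiv (S - X) 2) X) ((2 : Int) ^ k - 1)) = X) :
    2 * PySem.Int.band (PySem.Int.floordiv (S - X) 2) ((2 : Int) ^ k - 1) +
      3 * PySem.Int.band (PySem.Int.bor (PySem.Int.floordiv (S - X) 2) X) ((2 : Int) ^ k - 1) =
    pvClosedForm S X := by
  set A := PySem.Int.floordiv (S - X) 2 with hA
  set x := PySem.Int.band A ((2 : Int) ^ k - 1) with hx
  set y := PySem.Int.band (PySem.Int.bor A X) ((2 : Int) ^ k - 1) with hy
  have tbx : ∀ i, x.testBit i = (A.testBit i && decide (i < k)) := by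
    intro i; rw [hx, pvTbBand, pvTbMask]
  have tby : ∀ i, y.testBit i = ((A.testBit i || X.testBit i) && decide (i < k)) := by
    intro i; rw [hy, pvTbBand, pvTbBor, pvTbMask]
  have hXhigh : ∀ i, k ≤ i → X.testBit i = false := by
    intro i hi
    rw [← hxor, pvTbBxor, tbx, tby, decide_eq_false (show ¬ i < k by omega)]
    simp
  have hXnn : 0 ≤ X := pvNonnegOfBits (k := k) (fun i h => by
    by_contra hik; exact absurd (hXhigh i (by omega)) (by simp [h]))
  have hxnn : 0 ≤ x := pvNonnegOfBits (k := k) (fun i h => by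
    by_contra hik
    rw [tbx i] at h
    simp [(by omega : ¬ i < k)] at h)
  have hbandxX : PySem.Int.band x X = 0 := by
    apply pvIntExt; intro i
    rw [pvTbBand, tbx, pvTbZero]
    by_cases hik : i < k
    · have := H1 i hik
      cases hA' : A.testBit i <;> cases hX' : X.testBit i <;>
        simp [hA', hX'] at this ⊢
    · simp [hik]
  have hyx : y = x + X := by
    have hbor : y = PySem.Int.bor x X := by
      apply pvIntExt; intro i
      rw [tby, pvTbBor, tbx]
      by_cases hik : i < k
      · simp [hik]
      · simp [hik, hXhigh i (by omega)]
    rw [hbor]; exact pvBorEqAdd hxnn hXnn hbandxX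
  have hS : S - X = 2 * x := by omega
  have hAx : A = x := by rw [hA, hS]; exact pvFloordivTwoMul x
  have hAhigh : ∀ i, k ≤ i → A.testBit i = false := by
    intro i hi
    rw [hAx, tbx, decide_eq_false (show ¬ i < k by omega)]
    simp
  have hMask : ((1 : Int) <<< (40 : Nat) - 1) = (2 : Int) ^ 40 - 1 := by rw [pvOneShl]
  have hcond : PySem.Int.band (PySem.Int.band A X) ((2 : Int) ^ 40 - 1) = 0 := by
    apply pvIntExt; intro i
    rw [pvTbBand, pvTbBand, pvTbMask, pvTbZero]
    by_cases hik : i < k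
    · have := H1 i hik
      cases hA' : A.testBit i <;> cases hX' : X.testBit i <;> simp [hA', hX'] at this ⊢
    · simp [hAhigh i (by omega)]
  have hbAM : PySem.Int.band A ((2 : Int) ^ 40 - 1) = x := by
    apply pvIntExt; intro i
    rw [pvTbBand, pvTbMask, tbx]
    by_cases hik : i < k
    · simp [hik, (by omega : i < 40)]
    · simp [hik, hAhigh i (by omega)]
  have hbOM : PySem.Int.band (PySem.Int.bor A X) ((2 : Int) ^ 40 - 1) = y := by
    apply pvIntExt; intro i
    rw [pvTbBand, pvTbBor, pvTbMask, tby]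
    by_cases hik : i < k
    · simp [hik, (by omega : i < 40)]
    · simp [hik, hAhigh i (by omega), hXhigh i (by omega)]
  show 2 * x + 3 * y = pvClosedForm S X
  rw [pvClosedForm]
  simp only [hMask, ← hA, hcond, hbAM, hbOM]
  simp

-- the main invariant: from loop counter k on, with (x,y) holding the bits below k,
-- the loop computes the closed form
theorem pvGoInvariant (S X : Int) (k : Nat) (hk : k ≤ 40)
    (H1 : ∀ j, j < k → ((PySem.Int.floordiv (S - X) 2).testBit j && X.testBit j) = false) :
    pvGo S X (PySem.Int.floordiv (S - X) 2) k
      (PySem.Int.band (PySem.Int.floordiv (S - X) 2) ((2 : Int) ^ k - 1))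
      (PySem.Int.band (PySem.Int.bor (PySem.Int.floordiv (S - X) 2) X) ((2 : Int) ^ k - 1)) =
    pvClosedForm S X := by
  rw [pvGo]
  by_cases h40 : k < 40
  · rw [if_pos h40]
    by_cases hbrk : PySem.Int.band (PySem.Int.floordiv (S - X) 2) ((2 : Int) ^ k - 1) +
        PySem.Int.band (PySem.Int.bor (PySem.Int.floordiv (S - X) 2) X) ((2 : Int) ^ k - 1) = S ∧
        PySem.Int.bxor (PySem.Int.band (PySem.Int.floordiv (S - X) 2) ((2 : Int) ^ k - 1))
          (PySem.Int.band (PySem.Int.bor (PySem.Int.floordiv (S - X) 2) X) ((2 : Int) ^ k - 1)) = X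
    · simp only [pvBandPow, if_pos hbrk]
      exact pvBreak S X k (by omega) H1 hbrk.1 hbrk.2
    · simp only [pvBandPow, if_neg hbrk]
      have hXA : ((PySem.Int.bor (PySem.Int.floordiv (S - X) 2) X)).testBit k =
          ((PySem.Int.floordiv (S - X) 2).testBit k || X.testBit k) := pvTbBor _ _ _
      cases hXb : X.testBit k <;> cases hAb : (PySem.Int.floordiv (S - X) 2).testBit k <;>
        simp only [hXb, hAb, if_true] at hXA ⊢
      · -- Xi = 0, Ai = 0
        rw [if_pos ⟨rfl, rfl⟩]
        rw [← pvMaskStep hAb, ← pvMaskStep (by rw [hXA]; rfl : (PySem.Int.bor (PySem.Int.floordiv (S - X) 2) X).testBit k = false)]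
        exact pvGoInvariant S X (k + 1) (by omega)
          (fun j hj => by
            rcases Nat.lt_or_ge j k with hjk | hjk
            · exact H1 j hjk
            · have : j = k := by omega
              subst this
              rw [hAb]; rfl)
      · -- Xi = 0, Ai = 2^k
        rw [if_neg (fun h => absurd h.2 (by positivity)), if_pos ⟨rfl, by positivity⟩]
        rw [pvBorStep hAb, pvBorStep (by rw [hXA]; rfl : (PySem.Int.bor (PySem.Int.floordiv (S - X) 2) X).testBit k = true)]
        exact pvGoInvariant S X (k + 1) (by omega)
          (fun j hj => by
            rcases Nat.lt_or_ge j k with hjk | hjk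
            · exact H1 j hjk
            · have : j = k := by omega
              subst this
              rw [hXb]; simp)
      · -- Xi = 2^k, Ai = 0
        rw [if_neg (fun h => absurd h.1 (by positivity)),
            if_neg (fun h => absurd h.1 (by positivity)),
            if_pos ⟨by positivity, rfl⟩]
        rw [← pvMaskStep hAb, pvBorStep (by rw [hXA]; rfl : (PySem.Int.bor (PySem.Int.floordiv (S - X) 2) X).testBit k = true)]
        exact pvGoInvariant S X (k + 1) (by omega)
          (fun j hj => by
            rcases Nat.lt_or_ge j k with hjk | hjk
            · exact H1 j hjk
            · have : j = k := by omega
              subst this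
              rw [hAb]; simp)
      · -- Xi = 2^k, Ai = 2^k : contradiction bit, A returns 0
        rw [if_neg (fun h => absurd h.1 (by positivity)),
            if_neg (fun h => absurd h.1 (by positivity)),
            if_neg (fun h => absurd h.2 (by positivity))]
        have htb : (PySem.Int.band (PySem.Int.band (PySem.Int.floordiv (S - X) 2) X)
            ((2 : Int) ^ 40 - 1)).testBit k = true := by
          rw [pvTbBand, pvTbBand, pvTbMask, hAb, hXb, decide_eq_true h40]
          rfl
        have hne : PySem.Int.band (PySem.Int.band (PySem.Int.floordiv (S - X) 2) X)
            ((2 : Int) ^ 40 - 1) ≠ 0 := by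
          intro h0; rw [h0, pvTbZero] at htb; exact Bool.false_ne_true htb
        simp only [pvClosedForm, pvOneShl]
        rw [if_pos hne]
  · rw [if_neg h40]
    have hk40 : k = 40 := by omega
    subst hk40
    have hcond : PySem.Int.band (PySem.Int.band (PySem.Int.floordiv (S - X) 2) X)
        ((2 : Int) ^ 40 - 1) = 0 := by
      apply pvIntExt; intro i
      rw [pvTbBand, pvTbBand, pvTbMask, pvTbZero]
      by_cases hik : i < 40
      · rw [H1 i hik]; rfl
      · rw [decide_eq_false hik]; simp
    simp only [pvClosedForm, pvOneShl]
    rw [if_neg (fun h => h hcond)]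
  termination_by 40 - k

-- outer loop: A's foldl-append over pyRange is B's map over List.range
theorem pvOuter (array1 array2 : List Int) :
    bitwise_equations array1 array2 =
      (List.range array1.length).map
        (fun (i : Nat) => pvGetBitResult (PySem.List.pyGetD array1 (i : Int) 0)
                                 (PySem.List.pyGetD array2 (i : Int) 0)) := by
  unfold bitwise_equations
  rw [PySem.List.foldl_append_singleton_eq_map, PySem.List.pyRange_one, List.map_map]
  have hlen : ((array1.length : Int) - 0).toNat = array1.length := by simp
  rw [hlen, List.nil_append]
  exact List.map_congr_left (fun k _ => by simp)

theorem pvElem (S X : Int) : pvGetBitResult S X = pvClosedForm S X := by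
  have h0 : (PySem.Int.band (PySem.Int.floordiv (S - X) 2) ((2 : Int) ^ 0 - 1)) = 0 := by
    simp [PySem.Int.band_zero]
  have h1 : (PySem.Int.band (PySem.Int.bor (PySem.Int.floordiv (S - X) 2) X) ((2 : Int) ^ 0 - 1)) = 0 := by
    simp [PySem.Int.band_zero]
  have := pvGoInvariant S X 0 (by omega) (by intro j hj; omega)
  rw [h0, h1] at this
  simpa [pvGetBitResult] using this

-- ===== VERDICT (by name: the statement is the Claim_ definition above) =====
theorem bitwise_equations_spec : Claim_equal_bitwise_equations := by
  intro array1 array2 _hdom _hpre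
  unfold Spec_bitwise_equations
  rw [pvOuter, bitwise_equations_alt]
  exact List.map_congr_left (fun i _ => pvElem _ _)
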